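-- pv_equiv track=rewrite | github.com/yoounseho/topcoder | Q10/python/CorporationSalary.py | totalSalary
-- ===== SOURCE A (Python) =====
-- def totalSalary(relations : list):
--     salary = [0 for i in range(0,relations.__len__())]
--     i = 0
--     while True:
--         for i in range(0,relations.__len__()):
--             #급여가 계산된 상태면 더이상 계산할 필요 없음.
--             if salary[i] == 0:
--                 bCheck : bool = False
--                 for l in range(0,relations[i].__len__()):
--                     if relations[i][l] == 'Y':
--                         #아직 부하 급여가 계산이 안되었다면 계산할 필요 없음.
--                         if salary[l] == 0:
--                             bCheck = True
--
--                 if bCheck is False: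
--                     sal : int = 0 # 급여 계산 시작
--                     bFlag : bool = False
--                     l = 0
--                     for l in range(0,relations[i].__len__()):
--                         if relations[i][l] == 'Y':
--                             bFlag = True
--                             sal = sal + salary[l]
--
--                     if bFlag is False:
--                         sal = 1
--                     salary[i] = sal
--
--         #탈출 조건 계산
--         condition : int = 1
--         for n in range(0,salary.__len__()):
--             condition = condition * salary[n]
--
--         if condition != 0:
--             break
--
--     sum : int = 0
--     for m in range(0,salary.__len__()):
--         sum = sum + salary[m]
--     return sum
-- ===== SOURCE B (Python) =====
-- def totalSalary(relations: list):
--     n = len(relations)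
--     subs = [[l for l, c in enumerate(row) if c == 'Y'] for row in relations]
--     v = [0] * n
--     for _ in range(n):
--         v = [sum(v[l] for l in sb) if sb else 1 for sb in subs]
--     return sum(v)
-- ===== Notes on version B (the rewrite author's own statement) =====
-- stated objective: simpler
-- what changed: A's unbounded sweep-until-all-computed loop over an in-place write-once salary array (readiness flags bCheck/bFlag per employee, product-of-salaries termination test) is replaced by n rounds of synchronous recomputation of the whole salary vector from subordinate lists precomputed once; after n rounds every entry has reached its fixed point.
import Mathlib
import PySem

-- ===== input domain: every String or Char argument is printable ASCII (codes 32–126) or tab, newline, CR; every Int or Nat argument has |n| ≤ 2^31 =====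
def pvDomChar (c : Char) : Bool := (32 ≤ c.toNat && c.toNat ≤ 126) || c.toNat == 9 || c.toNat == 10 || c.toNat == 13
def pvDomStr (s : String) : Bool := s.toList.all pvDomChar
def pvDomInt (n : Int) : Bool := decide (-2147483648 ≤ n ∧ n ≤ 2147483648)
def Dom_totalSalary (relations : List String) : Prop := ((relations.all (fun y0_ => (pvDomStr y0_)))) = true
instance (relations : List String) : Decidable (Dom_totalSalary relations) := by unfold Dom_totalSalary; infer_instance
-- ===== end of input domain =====

-- B replaces A's sweep-until-everything-is-computed in-place loop (with readiness flags and a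
-- product-based termination test) by n rounds of synchronous recomputation of the whole salary
-- vector from precomputed subordinate lists; objective: simpler.

-- ===== PORT A =====
-- one pass of A's inner `for i in range(0, len(relations))` body at index i
def tsStep (relations : List String) (s : List Int) (i : Nat) : List Int :=
  if s.getD i 0 = 0 then
    let row := (relations.getD i "").toList
    let bCheck := (List.range row.length).foldl
      (fun b l => if row.getD l ' ' = 'Y' ∧ s.getD l 0 = 0 then true else b) false
    if bCheck then s
    else
      let p := (List.range row.length).foldl
        (fun (p : Int × Bool) l => if row.getD l ' ' = 'Y' then (p.1 + s.getD l 0, true) else p)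
        (0, false)
      let sal := if p.2 then p.1 else 1
      s.set i sal
  else s

-- one full sweep `for i in range(0, len(relations))`
def tsSweep (relations : List String) (s : List Int) : List Int :=
  (List.range relations.length).foldl (tsStep relations) s

-- the `while True` loop; fuel (relations.length + 1) always suffices on inputs satisfying
-- Pre_totalSalary (proved below); on other inputs Python A diverges or raises
def tsLoop (relations : List String) : Nat → List Int → List Int
  | 0, s => s
  | fuel+1, s =>
      let s' := tsSweep relations s
      let condition := s'.foldl (· * ·) 1
      if condition ≠ 0 then s' else tsLoop relations fuel s'

def totalSalary (relations : List String) : Int :=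
  let n := relations.length
  let salary : List Int := List.replicate n 0
  let final := tsLoop relations (n + 1) salary
  final.foldl (· + ·) 0

-- ===== PORT B =====
-- subs = [[l for l, c in enumerate(row) if c == 'Y'] for row in relations]
def altSubs (relations : List String) : List (List Int) :=
  relations.map (fun row =>
    (PySem.List.enumerate row.toList).filterMap (fun p => if p.2 = 'Y' then some p.1 else none))

-- v = [sum(v[l] for l in sb) if sb else 1 for sb in subs]
def altRound (subs : List (List Int)) (v : List Int) : List Int :=
  subs.map (fun sb => if sb.isEmpty then (1 : Int)
                      else (sb.map (fun l => PySem.List.pyGetD v l 0)).sum)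

def totalSalary_alt (relations : List String) : Int :=
  let n := relations.length
  let subs := altSubs relations
  let v : List Int := List.replicate n 0
  let v := (List.range n).foldl (fun v _ => altRound subs v) v
  v.foldl (· + ·) 0

-- ===== PRECONDITION & SPEC =====
-- positions (offset by `off`) of the character 'Y' in a row
def gsubs : List Char → Nat → List Nat
  | [], _ => []
  | c :: xs, off => if c = 'Y' then off :: gsubs xs (off + 1) else gsubs xs (off + 1)

-- rpB relations k i: employee i's salary is determined within rank k — i is a valid index and
-- every subordinate (each 'Y' position of row i) has rank < k.  This is the standard finite-rank
-- characterisation: every i < n has rank ≤ n exactly when all 'Y' positions are < n (otherwise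
-- Python A raises IndexError) and the subordinate digraph is acyclic (otherwise A loops forever).
def rpB (relations : List String) : Nat → Nat → Bool
  | 0, _ => false
  | k+1, i => decide (i < relations.length) &&
      (gsubs (relations.getD i "").toList 0).all (fun l => rpB relations k l)

-- Pre_ is exactly the set of inputs on which Python A terminates normally: every 'Y' position in
-- range and no cycles in the subordinate digraph (on a cycle A's while-loop never ends; a 'Y'
-- at position ≥ len(relations) makes salary[l] raise IndexError).
def Pre_totalSalary (relations : List String) : Prop :=
  ∀ i < relations.length, rpB relations relations.length i = true

instance (relations : List String) : Decidable (Pre_totalSalary relations) := by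
  unfold Pre_totalSalary; infer_instance

def pvWitness_totalSalary : List String := ["NYN", "NNN", "YNN"]

def Spec_totalSalary (relations : List String) (out : Int) : Prop := out = totalSalary_alt relations
instance (relations : List String) (out : Int) : Decidable (Spec_totalSalary relations out) := by
  unfold Spec_totalSalary; infer_instance

-- ===== CLAIM (what is proved, stated in full; the proofs are below) =====
def Claim_equal_totalSalary : Prop := ∀ (relations : List String), Dom_totalSalary relations →
  Pre_totalSalary relations → Spec_totalSalary relations (totalSalary relations)

-- ===== LEMMAS AND PROOFS =====

-- the 'Y' positions of row i (as naturals)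
def sub0 (relations : List String) (i : Nat) : List Nat :=
  gsubs (relations.getD i "").toList 0

-- the salary equation both programs solve
def specVal (relations : List String) (f : Nat → Int) (i : Nat) : Int :=
  if sub0 relations i = [] then 1 else ((sub0 relations i).map f).sum

-- ---- generic fold shapes used by A's port ----

theorem or_foldl (C : Nat → Prop) [DecidablePred C] (ys : List Nat) : ∀ (b : Bool),
    ys.foldl (fun b l => if C l then true else b) b = (b || ys.any fun l => decide (C l)) := by
  induction ys with
  | nil => simp
  | cons y ys ih =>
    intro b
    simp only [List.foldl_cons, List.any_cons, ih]
    by_cases h : C y <;> simp [h]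

theorem pair_foldl (C : Nat → Prop) [DecidablePred C] (f : Nat → Int) (ys : List Nat) :
    ∀ (a : Int) (b : Bool),
    ys.foldl (fun p l => if C l then (p.1 + f l, true) else p) (a, b) =
      (a + ((ys.filter fun l => decide (C l)).map f).sum, b || ys.any fun l => decide (C l)) := by
  induction ys with
  | nil => simp
  | cons y ys ih =>
    intro a b
    by_cases h : C y <;> simp [h, ih, add_assoc]

-- ---- gsubs vs the range/filter and enumerate/filterMap forms ----

theorem gsubs_eq (xs : List Char) : ∀ (off : Nat),
    gsubs xs off =
      ((List.range xs.length).filter (fun l => decide (xs.getD l ' ' = 'Y'))).map (fun l => off + l) := by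
  induction xs with
  | nil => simp [gsubs]
  | cons c ys ih =>
    intro off
    have hmm : ∀ q : List Nat,
        List.map (fun l => off + l) (List.map Nat.succ q) = List.map (fun l => off + 1 + l) q := by
      intro q
      rw [List.map_map]
      exact List.map_congr_left (fun a _ => by simp only [Function.comp_apply]; omega)
    rw [List.length_cons, List.range_succ_eq_map, List.filter_cons, List.filter_map]
    simp only [List.getD_cons_zero, Function.comp_def, List.getD_cons_succ]
    by_cases h : c = 'Y'
    · rw [if_pos (by simp [h]), List.map_cons, hmm, Nat.add_zero]
      simp [gsubs, h, ih (off + 1)]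
    · rw [if_neg (by simp [h]), hmm]
      simp [gsubs, h, ih (off + 1)]

theorem gsubs_zero (xs : List Char) :
    gsubs xs 0 = (List.range xs.length).filter (fun l => decide (xs.getD l ' ' = 'Y')) := by
  rw [gsubs_eq]
  simp

theorem mem_gsubs_zero (xs : List Char) (l : Nat) :
    l ∈ gsubs xs 0 ↔ l < xs.length ∧ xs.getD l ' ' = 'Y' := by
  rw [gsubs_zero]
  simp [List.mem_filter, List.mem_range]

theorem enum_filterMap (xs : List Char) : ∀ (off : Nat),
    (PySem.List.enumerate xs (off : Int)).filterMap
        (fun p => if p.2 = 'Y' then some p.1 else none) =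
      (gsubs xs off).map (fun l : Nat => (l : Int)) := by
  induction xs with
  | nil => intro off; simp [PySem.List.enumerate_nil, gsubs]
  | cons c ys ih =>
    intro off
    have hcast : ((off : Int) + 1) = ((off + 1 : Nat) : Int) := by push_cast; ring
    by_cases h : c = 'Y'
    · rw [show (List.filterMap (fun p : Int × Char => if p.2 = 'Y' then some p.1 else none)
            (PySem.List.enumerate (c :: ys) (off : Int))) =
          (off : Int) :: List.filterMap (fun p : Int × Char => if p.2 = 'Y' then some p.1 else none)
            (PySem.List.enumerate ys ((off : Int) + 1)) from by
          rw [PySem.List.enumerate_cons]; simp [h]]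
      rw [hcast, ih (off + 1)]
      simp [gsubs, h]
    · rw [show (List.filterMap (fun p : Int × Char => if p.2 = 'Y' then some p.1 else none)
            (PySem.List.enumerate (c :: ys) (off : Int))) =
          List.filterMap (fun p : Int × Char => if p.2 = 'Y' then some p.1 else none)
            (PySem.List.enumerate ys ((off : Int) + 1)) from by
          rw [PySem.List.enumerate_cons]; simp [h]]
      rw [hcast, ih (off + 1)]
      simp [gsubs, h]

-- ---- characterisation of one step of A's sweep ----

theorem getD_set_eq (s : List Int) (i j : Nat) (v : Int) :
    (s.set i v).getD j 0 = if i = j ∧ i < s.length then v else s.getD j 0 := by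
  rw [List.getD_eq_getElem?_getD, List.getD_eq_getElem?_getD, List.getElem?_set]
  split
  · rename_i h
    subst h
    by_cases hl : i < s.length <;> simp [hl]
  · rename_i h
    simp [h]

theorem tsStep_char (relations : List String) (s : List Int) (i : Nat) :
    tsStep relations s i =
      if s.getD i 0 = 0 ∧ ∀ l ∈ sub0 relations i, s.getD l 0 ≠ 0 then
        s.set i (specVal relations (fun l => s.getD l 0) i)
      else s := by
  simp only [tsStep]
  rw [or_foldl (fun l => (relations.getD i "").toList.getD l ' ' = 'Y' ∧ s.getD l 0 = 0),
      pair_foldl (fun l => (relations.getD i "").toList.getD l ' ' = 'Y') (fun l => s.getD l 0)]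
  by_cases hz : s.getD i 0 = 0
  · rw [if_pos hz]
    by_cases hr : ∀ l ∈ sub0 relations i, s.getD l 0 ≠ 0
    · have hany1 : ((List.range (relations.getD i "").toList.length).any
          (fun l => decide ((relations.getD i "").toList.getD l ' ' = 'Y' ∧ s.getD l 0 = 0))) = false := by
        simp only [List.any_eq_false, List.mem_range, decide_eq_true_eq, not_and]
        intro l hl hY
        exact hr l ((mem_gsubs_zero _ l).2 ⟨hl, hY⟩)
      have hcond : s.getD i 0 = 0 ∧ ∀ l ∈ sub0 relations i, s.getD l 0 ≠ 0 := ⟨hz, hr⟩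
      rw [hany1]
      simp only [Bool.false_or, Bool.false_eq_true, if_false]
      rw [if_pos hcond]
      congr 1
      unfold specVal sub0
      rw [show ((List.range (relations.getD i "").toList.length).filter
            (fun l => decide ((relations.getD i "").toList.getD l ' ' = 'Y'))) =
          gsubs (relations.getD i "").toList 0 from (gsubs_zero _).symm]
      rcases hse : gsubs (relations.getD i "").toList 0 with - | ⟨a, t⟩
      · have hany2 : ((List.range (relations.getD i "").toList.length).any
            (fun l => decide ((relations.getD i "").toList.getD l ' ' = 'Y'))) = false := by
          simp only [List.any_eq_false, List.mem_range, decide_eq_true_eq]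
          intro l hl hY
          have hmem : l ∈ gsubs (relations.getD i "").toList 0 := (mem_gsubs_zero _ l).2 ⟨hl, hY⟩
          rw [hse] at hmem
          simp at hmem
        rw [hany2]
        simp [hse]
      · have ha : a ∈ gsubs (relations.getD i "").toList 0 := by
          rw [hse]; exact List.mem_cons_self
        have ha' := (mem_gsubs_zero _ a).1 ha
        have hany2 : ((List.range (relations.getD i "").toList.length).any
            (fun l => decide ((relations.getD i "").toList.getD l ' ' = 'Y'))) = true := by
          simp only [List.any_eq_true, List.mem_range, decide_eq_true_eq]
          exact ⟨a, ha'.1, ha'.2⟩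
        rw [hany2]
        simp [hse]
    · have hany1 : ((List.range (relations.getD i "").toList.length).any
          (fun l => decide ((relations.getD i "").toList.getD l ' ' = 'Y' ∧ s.getD l 0 = 0))) = true := by
        push_neg at hr
        obtain ⟨l, hlmem, hlz⟩ := hr
        have hm := (mem_gsubs_zero _ l).1 hlmem
        simp only [List.any_eq_true, List.mem_range, decide_eq_true_eq]
        exact ⟨l, hm.1, hm.2, by simpa using hlz⟩
      have hcond : ¬(s.getD i 0 = 0 ∧ ∀ l ∈ sub0 relations i, s.getD l 0 ≠ 0) :=
        fun hc => hr hc.2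
      rw [hany1]
      simp only [Bool.false_or, if_pos rfl]
      rw [if_neg hcond]
      simp
  · have hcond : ¬(s.getD i 0 = 0 ∧ ∀ l ∈ sub0 relations i, s.getD l 0 ≠ 0) :=
      fun hc => hz hc.1
    rw [if_neg hz, if_neg hcond]

-- ---- the invariant carried through A's sweeps ----

def Frozen (s t : List Int) : Prop := ∀ i, s.getD i 0 ≠ 0 → t.getD i 0 = s.getD i 0

def InvA (relations : List String) (s : List Int) : Prop :=
  s.length = relations.length ∧
  (∀ i, 0 ≤ s.getD i 0) ∧
  (∀ i, s.getD i 0 ≠ 0 →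
    (∀ l ∈ sub0 relations i, s.getD l 0 ≠ 0) ∧
    s.getD i 0 = specVal relations (fun l => s.getD l 0) i)

theorem specVal_congr (relations : List String) (f g : Nat → Int) (i : Nat)
    (h : ∀ l ∈ sub0 relations i, f l = g l) :
    specVal relations f i = specVal relations g i := by
  unfold specVal
  split
  · rfl
  · exact congrArg List.sum (List.map_congr_left h)

theorem specVal_pos (relations : List String) (s : List Int) (i : Nat)
    (hnn : ∀ l, 0 ≤ s.getD l 0) (hr : ∀ l ∈ sub0 relations i, s.getD l 0 ≠ 0) :
    0 < specVal relations (fun l => s.getD l 0) i := by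
  unfold specVal
  split
  · norm_num
  · rename_i hne
    apply List.sum_pos
    · intro x hx
      obtain ⟨l, hl, rfl⟩ := List.mem_map.1 hx
      exact lt_of_le_of_ne (hnn l) (Ne.symm (hr l hl))
    · simpa using hne

theorem step_frozen (relations : List String) (s : List Int) (i : Nat) :
    Frozen s (tsStep relations s i) := by
  rw [tsStep_char]
  split
  · rename_i h
    intro j hj
    rw [getD_set_eq]
    split
    · rename_i hij
      exact absurd (hij.1 ▸ h.1) hj
    · rfl
  · intro j hj; rfl

theorem step_inv (relations : List String) (s : List Int) (i : Nat)
    (h : InvA relations s) : InvA relations (tsStep relations s i) := by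
  obtain ⟨hlen, hnn, hmain⟩ := h
  rw [tsStep_char]
  split
  · rename_i hcond
    obtain ⟨hz, hready⟩ := hcond
    have hsubne : ∀ l ∈ sub0 relations i, l ≠ i := by
      intro l hl hli
      exact hready l hl (hli ▸ hz)
    have hget : ∀ j, (s.set i (specVal relations (fun l => s.getD l 0) i)).getD j 0 =
        if i = j ∧ i < s.length then specVal relations (fun l => s.getD l 0) i else s.getD j 0 :=
      fun j => getD_set_eq s i j _
    have hsame : ∀ l ∈ sub0 relations i,
        (s.set i (specVal relations (fun l => s.getD l 0) i)).getD l 0 = s.getD l 0 := by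
      intro l hl
      rw [hget l, if_neg]
      rintro ⟨hil, -⟩
      exact hsubne l hl hil.symm
    refine ⟨by simpa using hlen, ?_, ?_⟩
    · intro j
      rw [hget j]
      split
      · exact le_of_lt (specVal_pos relations s i hnn hready)
      · exact hnn j
    · intro j hj
      rw [hget j] at hj
      by_cases hij : i = j ∧ i < s.length
      · obtain ⟨rfl, hi⟩ := hij
        constructor
        · intro l hl
          rw [hsame l hl]
          exact hready l hl
        · rw [hget i, if_pos ⟨rfl, hi⟩]
          exact (specVal_congr relations _ _ i (fun l hl => (hsame l hl).symm))
      · rw [if_neg hij] at hj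
        obtain ⟨hr', hs'⟩ := hmain j hj
        have hsamej : ∀ l ∈ sub0 relations j,
            (s.set i (specVal relations (fun l => s.getD l 0) i)).getD l 0 = s.getD l 0 := by
          intro l hl
          rw [hget l, if_neg]
          rintro ⟨hil, -⟩
          exact hr' l hl (hil ▸ hz)
        constructor
        · intro l hl
          rw [hsamej l hl]
          exact hr' l hl
        · rw [hget j, if_neg hij, hs']
          exact specVal_congr relations _ _ j (fun l hl => (hsamej l hl).symm)
  · exact ⟨hlen, hnn, hmain⟩

theorem step_progress (relations : List String) (s : List Int) (i : Nat)
    (hi : i < relations.length) (h : InvA relations s)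
    (hready : ∀ l ∈ sub0 relations i, s.getD l 0 ≠ 0) :
    (tsStep relations s i).getD i 0 ≠ 0 := by
  obtain ⟨hlen, hnn, -⟩ := h
  rw [tsStep_char]
  by_cases hz : s.getD i 0 = 0
  · rw [if_pos ⟨hz, hready⟩, getD_set_eq, if_pos ⟨rfl, hlen ▸ hi⟩]
    exact ne_of_gt (specVal_pos relations s i hnn hready)
  · split
    · rename_i hc; exact absurd hc.1 hz
    · exact hz

theorem frozen_trans (s t u : List Int) (h1 : Frozen s t) (h2 : Frozen t u) : Frozen s u := by
  intro i hi
  rw [h2 i (h1 i hi ▸ hi), h1 i hi]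

theorem foldSteps (relations : List String) : ∀ (xs : List Nat) (s : List Int),
    (∀ i ∈ xs, i < relations.length) → InvA relations s →
    InvA relations (xs.foldl (tsStep relations) s) ∧
    Frozen s (xs.foldl (tsStep relations) s) ∧
    (∀ i ∈ xs, (∀ l ∈ sub0 relations i, s.getD l 0 ≠ 0) →
      (xs.foldl (tsStep relations) s).getD i 0 ≠ 0) := by
  intro xs
  induction xs with
  | nil => exact fun s _ hinv => ⟨hinv, fun i _ => rfl, by simp⟩
  | cons i xs ih =>
    intro s hmem hinv
    have hi : i < relations.length := hmem i List.mem_cons_self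
    have hinv1 := step_inv relations s i hinv
    have hfr1 := step_frozen relations s i
    obtain ⟨hinv2, hfr2, hprog2⟩ := ih (tsStep relations s i)
      (fun j hj => hmem j (List.mem_cons_of_mem i hj)) hinv1
    simp only [List.foldl_cons]
    refine ⟨hinv2, frozen_trans _ _ _ hfr1 hfr2, ?_⟩
    intro j hj hready
    rcases List.mem_cons.1 hj with rfl | hjx
    · have h1 : (tsStep relations s j).getD j 0 ≠ 0 := step_progress relations s j hi hinv hready
      rw [hfr2 j h1]
      exact h1
    · exact hprog2 j hjx (fun l hl => (hfr1 l (hready l hl)) ▸ hready l hl)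

-- ---- sweeps resolve ranks, the loop finishes within its fuel ----

theorem sweep_inv (relations : List String) (s : List Int) (h : InvA relations s) :
    InvA relations (tsSweep relations s) :=
  (foldSteps relations (List.range relations.length) s (by simp) h).1

theorem sweep_progress (relations : List String) (s : List Int) (k : Nat)
    (hinv : InvA relations s) (hk : ∀ j, rpB relations k j = true → s.getD j 0 ≠ 0) :
    ∀ i, rpB relations (k + 1) i = true → (tsSweep relations s).getD i 0 ≠ 0 := by
  intro i hrp
  unfold rpB at hrp
  simp only [Bool.and_eq_true, decide_eq_true_eq, List.all_eq_true] at hrp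
  exact (foldSteps relations (List.range relations.length) s (by simp) hinv).2.2 i
    (List.mem_range.2 hrp.1) (fun l hl => hk l (hrp.2 l hl))

theorem rpB_mono_succ (relations : List String) : ∀ (k : Nat) (i : Nat),
    rpB relations k i = true → rpB relations (k + 1) i = true := by
  intro k
  induction k with
  | zero => intro i h; simp [rpB] at h
  | succ k ih =>
    intro i h
    unfold rpB at h ⊢
    simp only [Bool.and_eq_true, List.all_eq_true] at h ⊢
    exact ⟨h.1, fun l hl => ih l (h.2 l hl)⟩

theorem rpB_mono (relations : List String) (k k' : Nat) (h : k ≤ k') (i : Nat)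
    (hr : rpB relations k i = true) : rpB relations k' i = true := by
  induction k', h using Nat.le_induction with
  | base => exact hr
  | succ k' _ ih => exact rpB_mono_succ relations k' i ih

theorem foldl_mul_ne_zero (s : List Int) (h : s.foldl (· * ·) 1 ≠ 0) :
    ∀ i < s.length, s.getD i 0 ≠ 0 := by
  intro i hi hz
  apply h
  rw [← List.prod_eq_foldl]
  apply List.prod_eq_zero
  rw [List.getD_eq_getElem s 0 hi] at hz
  exact hz ▸ List.getElem_mem hi

theorem loop_done (relations : List String) (hpre : Pre_totalSalary relations) :
    ∀ (fuel k : Nat) (s : List Int), InvA relations s →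
    (∀ j, rpB relations k j = true → s.getD j 0 ≠ 0) →
    relations.length ≤ k + fuel →
    InvA relations (tsLoop relations fuel s) ∧
    ∀ i < relations.length, (tsLoop relations fuel s).getD i 0 ≠ 0 := by
  intro fuel
  induction fuel with
  | zero =>
    intro k s hinv hk hle
    refine ⟨hinv, fun i hi => ?_⟩
    exact hk i (rpB_mono relations relations.length k (by omega) i (hpre i hi))
  | succ fuel ih =>
    intro k s hinv hk hle
    have hinv' := sweep_inv relations s hinv
    have hk' := sweep_progress relations s k hinv hk
    have hstep : tsLoop relations (fuel + 1) s =
        if (tsSweep relations s).foldl (· * ·) 1 ≠ 0 then tsSweep relations s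
        else tsLoop relations fuel (tsSweep relations s) := by simp only [tsLoop]
    rw [hstep]
    split
    · rename_i hcond
      exact ⟨hinv', fun i hi => foldl_mul_ne_zero _ hcond i (by rw [hinv'.1]; exact hi)⟩
    · exact ih (k + 1) (tsSweep relations s) hinv' hk' (by omega)

-- ---- A's result ----

def finalA (relations : List String) : List Int :=
  tsLoop relations (relations.length + 1) (List.replicate relations.length 0)

theorem getD_replicate_zero (n i : Nat) : (List.replicate n (0 : Int)).getD i 0 = 0 := by
  rw [List.getD_eq_getElem?_getD, List.getElem?_replicate]
  split <;> rfl

theorem finalA_props (relations : List String) (hpre : Pre_totalSalary relations) :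
    InvA relations (finalA relations) ∧
    ∀ i < relations.length, (finalA relations).getD i 0 ≠ 0 := by
  exact loop_done relations hpre (relations.length + 1) 0 (List.replicate relations.length 0)
    ⟨by simp, fun i => by simp [getD_replicate_zero],
      fun i hi => absurd (getD_replicate_zero relations.length i) hi⟩
    (fun j hj => by simp [rpB] at hj) (by omega)

theorem finalA_good (relations : List String) (hpre : Pre_totalSalary relations) :
    ∀ i < relations.length,
      (finalA relations).getD i 0 =
        specVal relations (fun l => (finalA relations).getD l 0) i := by
  intro i hi
  obtain ⟨⟨-, -, hmain⟩, hnz⟩ := finalA_props relations hpre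
  exact (hmain i (hnz i hi)).2

-- ---- B's rounds compute the same values ----

def jac (relations : List String) (m : Nat) : List Int :=
  (List.range m).foldl (fun v _ => altRound (altSubs relations) v)
    (List.replicate relations.length 0)

theorem jac_succ (relations : List String) (m : Nat) :
    jac relations (m + 1) = altRound (altSubs relations) (jac relations m) := by
  unfold jac
  rw [List.range_succ, List.foldl_append]
  rfl

theorem jac_len (relations : List String) : ∀ m, (jac relations m).length = relations.length := by
  intro m
  cases m with
  | zero => simp [jac]
  | succ m => rw [jac_succ]; simp [altRound, altSubs]

theorem altSubs_get (relations : List String) (i : Nat) (hi : i < relations.length) :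
    (altSubs relations).getD i [] = (sub0 relations i).map (fun l : Nat => (l : Int)) := by
  unfold altSubs
  rw [List.getD_eq_getElem (n := i) (relations.map (fun row =>
      (PySem.List.enumerate row.toList).filterMap
        (fun p => if p.2 = 'Y' then some p.1 else none))) [] (by simpa using hi),
    List.getElem_map]
  have hrow : relations[i] = relations.getD i "" := (List.getD_eq_getElem relations "" hi).symm
  rw [hrow]
  have h0 : (PySem.List.enumerate (relations.getD i "").toList) =
      PySem.List.enumerate (relations.getD i "").toList ((0 : Nat) : Int) := by simp
  rw [h0, enum_filterMap]
  rfl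

theorem altRound_getD (v : List Int) (sb : List Nat) :
    (if ((sb.map (fun l : Nat => (l : Int))).isEmpty) then (1 : Int)
     else (((sb.map (fun l : Nat => (l : Int))).map (fun l => PySem.List.pyGetD v l 0)).sum)) =
    (if sb = [] then 1 else ((sb.map (fun l => v.getD l 0)).sum)) := by
  cases sb with
  | nil => simp
  | cons a t =>
    have h1 : (((a :: t).map (fun l : Nat => (l : Int))).isEmpty) = false := rfl
    rw [h1]
    simp only [Bool.false_eq_true, if_false, List.map_map]
    rw [if_neg (List.cons_ne_nil a t)]
    exact congrArg List.sum (List.map_congr_left (fun l _ => by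
      simp only [Function.comp_apply]
      exact PySem.List.pyGetD_natCast v l 0))

theorem altRound_get (relations : List String) (v : List Int) (i : Nat)
    (hi : i < relations.length) :
    (altRound (altSubs relations) v).getD i 0 =
      specVal relations (fun l => v.getD l 0) i := by
  have hlen : i < (altSubs relations).length := by simpa [altSubs] using hi
  unfold altRound
  rw [List.getD_eq_getElem (n := i) ((altSubs relations).map (fun sb => if sb.isEmpty then (1 : Int)
        else (sb.map (fun l => PySem.List.pyGetD v l 0)).sum)) 0 (by simpa using hlen),
    List.getElem_map]
  rw [show (altSubs relations)[i] = (altSubs relations).getD i [] from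
      (List.getD_eq_getElem _ [] hlen).symm,
    altSubs_get relations i hi, altRound_getD]
  rfl

theorem jac_val (relations : List String) (hpre : Pre_totalSalary relations) :
    ∀ (k : Nat), ∀ (m i : Nat), k ≤ m → rpB relations k i = true →
      (jac relations m).getD i 0 = (finalA relations).getD i 0 := by
  intro k
  induction k with
  | zero => intro m i _ h; simp [rpB] at h
  | succ k ih =>
    intro m i hkm hrp
    obtain ⟨m, rfl⟩ : ∃ m', m = m' + 1 := ⟨m - 1, by omega⟩
    unfold rpB at hrp
    simp only [Bool.and_eq_true, decide_eq_true_eq, List.all_eq_true] at hrp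
    obtain ⟨hi, hsub⟩ := hrp
    rw [jac_succ, altRound_get relations _ i hi]
    have hcongr : specVal relations (fun l => (jac relations m).getD l 0) i =
        specVal relations (fun l => (finalA relations).getD l 0) i := by
      apply specVal_congr
      intro l hl
      exact ih m l (by omega) (hsub l hl)
    rw [hcongr]
    exact (finalA_good relations hpre i hi).symm

-- ---- the two result vectors are equal, hence so are the two sums ----

theorem vectors_eq (relations : List String) (hpre : Pre_totalSalary relations) :
    finalA relations = jac relations relations.length := by
  have hlenA : (finalA relations).length = relations.length := (finalA_props relations hpre).1.1
  apply List.ext_getElem (by rw [hlenA, jac_len])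
  intro i h1 h2
  have hi : i < relations.length := hlenA ▸ h1
  have hA : (finalA relations)[i] = (finalA relations).getD i 0 :=
    (List.getD_eq_getElem _ 0 h1).symm
  have hB : (jac relations relations.length)[i] = (jac relations relations.length).getD i 0 :=
    (List.getD_eq_getElem _ 0 h2).symm
  rw [hA, hB, jac_val relations hpre relations.length relations.length i le_rfl (hpre i hi)]

-- ===== VERDICT (by name: the statement is the Claim_ definition above) =====
theorem totalSalary_spec : Claim_equal_totalSalary := by
  intro relations _ hpre
  unfold Spec_totalSalary
  show (tsLoop relations (relations.length + 1)
      (List.replicate relations.length 0)).foldl (· + ·) 0 = _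
  have : totalSalary_alt relations = (jac relations relations.length).foldl (· + ·) 0 := rfl
  rw [this, ← vectors_eq relations hpre]
  rfl
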